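-- pv_equiv track=rewrite | github.com/walid404/InformationRetrievalSystem | Document.py | SortDocuments
-- ===== SOURCE A (Python) =====
-- def SortDocuments(documentNames):
--     numList = []
--     strList = []
--     for document in documentNames:
--         document = document.replace('.txt', '')
--         if document.isdecimal():
--             numList.append(int(document))
--         else:
--             strList.append(document)
--     numList = sorted(numList)
--     strList = sorted(strList)
--     for index in range(len(numList)):
--         numList[index] = str(numList[index])
--     return numList + strList
-- ===== SOURCE B (Python) =====
-- def SortDocuments(documentNames):
--     # Decorate-sort-undecorate: one single stable sort with a composite key
--     # instead of two buckets, two sorts and a concatenation.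
--     decorated = []
--     for document in documentNames:
--         document = document.replace('.txt', '')
--         if document.isdecimal():
--             decorated.append((0, int(document), ''))
--         else:
--             decorated.append((1, 0, document))
--     decorated.sort()
--     return [str(num) if tag == 0 else text for tag, num, text in decorated]
-- ===== Notes on version B (the rewrite author's own statement) =====
-- stated objective: alternative
-- what changed: Replaces the two-bucket/two-sort/concatenate structure with a single decorate-sort-undecorate pass: each name is mapped to a composite tuple key (numbers tagged 0 and compared as ints, others tagged 1 and compared as strings), sorted once, and mapped back.
import Mathlib
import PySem

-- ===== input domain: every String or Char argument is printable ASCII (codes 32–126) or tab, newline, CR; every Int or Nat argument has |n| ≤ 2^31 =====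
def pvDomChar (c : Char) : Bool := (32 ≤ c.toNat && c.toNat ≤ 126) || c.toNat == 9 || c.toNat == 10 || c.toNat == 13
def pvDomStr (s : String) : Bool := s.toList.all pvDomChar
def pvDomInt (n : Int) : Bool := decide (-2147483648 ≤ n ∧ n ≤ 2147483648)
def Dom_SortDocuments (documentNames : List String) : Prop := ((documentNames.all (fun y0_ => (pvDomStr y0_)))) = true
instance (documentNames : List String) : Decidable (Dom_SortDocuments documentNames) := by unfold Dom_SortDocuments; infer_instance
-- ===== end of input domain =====

-- B replaces A's two buckets + two sorts + concatenation by one decorate-sort-undecorate pass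
-- over composite tuple keys (objective: alternative structure, same value everywhere).
-- Note: Python '.isdecimal()' is ported as PySem.Str.strIsdigit, exact on the ASCII domain.

-- ===== PORT A =====
def SortDocuments (documentNames : List String) : List String :=
  -- the partition loop: append each cleaned name to numList (as int) or strList
  let p := documentNames.foldl
    (fun (acc : List Int × List String) document =>
      let d := PySem.Str.replace document ".txt" ""
      if PySem.Str.strIsdigit d then
        -- int(d) cannot raise here (d is all decimal digits), so getD 0 is never taken
        (acc.1 ++ [(PySem.Int.ofStr? d).getD 0], acc.2)
      else
        (acc.1, acc.2 ++ [d]))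
    ([], [])
  (PySem.List.sorted p.1 (fun x => x)).map PySem.Int.toStr ++ PySem.List.sorted p.2 (fun x => x)

-- ===== PORT B =====
-- decorate: numeric names become (0, int, ''), others (1, 0, name)
def pvDecor (document : String) : Int × Int × String :=
  let d := PySem.Str.replace document ".txt" ""
  if PySem.Str.strIsdigit d then (0, (PySem.Int.ofStr? d).getD 0, "")
  else (1, 0, d)

def pvUndecor (t : Int × Int × String) : String :=
  if t.1 == 0 then PySem.Int.toStr t.2.1 else t.2.2

def SortDocuments_alt (documentNames : List String) : List String :=
  -- decorated.sort() on the Python 3-tuples: the tag is compared first, then the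
  -- lexicographic order on (num, text) — exactly Python's tuple comparison here.
  (PySem.List.sorted2 (documentNames.map pvDecor) (fun t => t.1) (fun t => toLex t.2)).map pvUndecor

-- ===== PRECONDITION & SPEC =====
def Spec_SortDocuments (documentNames : List String) (out : List String) : Prop := out = SortDocuments_alt documentNames
instance (documentNames : List String) (out : List String) : Decidable (Spec_SortDocuments documentNames out) := by unfold Spec_SortDocuments; infer_instance

-- ===== CLAIM (what is proved, stated in full; the proofs are below) =====
def Claim_equal_SortDocuments : Prop := ∀ (documentNames : List String), Dom_SortDocuments documentNames → Spec_SortDocuments documentNames (SortDocuments documentNames)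

-- ===== LEMMAS AND PROOFS =====

-- x is inserted strictly before every element of ys
theorem insertBy_append_left {α : Type} (before : α → α → Bool) (x : α) (xs ys : List α)
    (h : ∀ y ∈ ys, before x y = true) :
    PySem.List.insertBy before x (xs ++ ys) = PySem.List.insertBy before x xs ++ ys := by
  induction xs with
  | nil =>
    cases ys with
    | nil => rfl
    | cons y t => simp [PySem.List.insertBy, h y (by simp)]
  | cons a xs ih =>
    simp only [List.cons_append, PySem.List.insertBy]
    by_cases hb : before x a = true
    · simp [hb]
    · simp only [Bool.not_eq_true] at hb
      simp [hb, ih]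

-- x is never inserted among the elements of xs
theorem insertBy_append_right {α : Type} (before : α → α → Bool) (x : α) (xs ys : List α)
    (h : ∀ y ∈ xs, before x y = false) :
    PySem.List.insertBy before x (xs ++ ys) = xs ++ PySem.List.insertBy before x ys := by
  induction xs with
  | nil => rfl
  | cons a xs ih =>
    simp only [List.cons_append, PySem.List.insertBy, h a (by simp)]
    simp only [Bool.false_eq_true, if_false, List.cons.injEq, true_and]
    exact ih (fun y hy => h y (by simp [hy]))

-- insertion commutes with mapping an order-reflecting embedding
theorem insertBy_map {α β : Type} (before : β → β → Bool) (before' : α → α → Bool)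
    (f : α → β) (x : α) (l : List α)
    (h : ∀ a b, before (f a) (f b) = before' a b) :
    PySem.List.insertBy before (f x) (l.map f) = (PySem.List.insertBy before' x l).map f := by
  induction l with
  | nil => rfl
  | cons a l ih =>
    simp only [List.map_cons, PySem.List.insertBy, h x a]
    by_cases hb : before' x a = true
    · simp [hb]
    · simp only [Bool.not_eq_true] at hb
      simp [hb, ih]

-- the comparator sorted2 uses in B's port
def pvCmp (a b : Int × Int × String) : Bool :=
  decide (a.1 < b.1) || (!decide (b.1 < a.1) && decide (toLex a.2 < toLex b.2))

theorem pvCmp_num_num (a b : Int) :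
    pvCmp (0, a, "") (0, b, "") = decide (a < b) := by
  simp [pvCmp, Prod.Lex.toLex_lt_toLex]

theorem pvCmp_str_str (a b : String) :
    pvCmp (1, 0, a) (1, 0, b) = decide (a < b) := by
  simp [pvCmp, Prod.Lex.toLex_lt_toLex]

theorem pvCmp_num_str (a : Int) (s : String) :
    pvCmp (0, a, "") (1, 0, s) = true := by
  simp [pvCmp]

theorem pvCmp_str_num (s : String) (a : Int) :
    pvCmp (1, 0, s) (0, a, "") = false := by
  simp [pvCmp]

-- A's partition loop, as a named function for the induction
def pvPart (documentNames : List String) : List Int × List String :=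
  documentNames.foldl
    (fun (acc : List Int × List String) document =>
      let d := PySem.Str.replace document ".txt" ""
      if PySem.Str.strIsdigit d then
        (acc.1 ++ [(PySem.Int.ofStr? d).getD 0], acc.2)
      else
        (acc.1, acc.2 ++ [d]))
    ([], [])

-- stability: one composite-key sort of the decorated list = the two sorts, concatenated
theorem sorted2_decor_eq (ds : List String) :
    PySem.List.sorted2 (ds.map pvDecor) (fun t => t.1) (fun t => toLex t.2)
      = ((PySem.List.sorted (pvPart ds).1 (fun x => x)).map (fun n => ((0 : Int), n, "")))
        ++ ((PySem.List.sorted (pvPart ds).2 (fun x => x)).map (fun s => ((1 : Int), (0 : Int), s))) := by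
  induction ds using List.reverseRecOn with
  | nil => rfl
  | append_singleton ds d ih =>
    have hs2 : ∀ (xs : List (Int × Int × String)),
        PySem.List.sorted2 xs (fun t => t.1) (fun t => toLex t.2)
          = xs.foldl (fun acc x => PySem.List.insertBy pvCmp x acc) [] := by
      intro xs; rfl
    have hs : ∀ (l : List Int) (x : Int),
        PySem.List.sorted (l ++ [x]) (fun y => y)
          = PySem.List.insertBy (fun a b => decide (a < b)) x (PySem.List.sorted l (fun y => y)) := by
      intro l x
      rw [PySem.List.sorted_eq_foldl_insertBy, PySem.List.sorted_eq_foldl_insertBy, List.foldl_append]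
      rfl
    have hsS : ∀ (l : List String) (x : String),
        PySem.List.sorted (l ++ [x]) (fun y => y)
          = PySem.List.insertBy (fun a b => decide (a < b)) x (PySem.List.sorted l (fun y => y)) := by
      intro l x
      rw [PySem.List.sorted_eq_foldl_insertBy, PySem.List.sorted_eq_foldl_insertBy, List.foldl_append]
      rfl
    rw [List.map_append, List.map_singleton, hs2, List.foldl_append, ← hs2 (ds.map pvDecor), ih]
    have hpart : pvPart (ds ++ [d]) =
        (if PySem.Str.strIsdigit (PySem.Str.replace d ".txt" "") then
           ((pvPart ds).1 ++ [(PySem.Int.ofStr? (PySem.Str.replace d ".txt" "")).getD 0], (pvPart ds).2)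
         else
           ((pvPart ds).1, (pvPart ds).2 ++ [PySem.Str.replace d ".txt" ""])) := by
      simp only [pvPart, List.foldl_append, List.foldl_cons, List.foldl_nil]
    by_cases hdig : PySem.Str.strIsdigit (PySem.Str.replace d ".txt" "") = true
    · -- numeric element: inserted within the numeric prefix
      rw [hpart]
      simp only [if_true, List.foldl_cons, List.foldl_nil, pvDecor, hdig]
      rw [insertBy_append_left pvCmp _ _ _ (by
            intro y hy
            simp only [List.mem_map] at hy
            obtain ⟨s, _, rfl⟩ := hy
            exact pvCmp_num_str _ s),
          insertBy_map pvCmp (fun a b => decide (a < b)) (fun n => ((0 : Int), n, "")) _ _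
            (fun a b => pvCmp_num_num a b),
          hs]
    · -- string element: inserted within the string suffix
      simp only [Bool.not_eq_true] at hdig
      rw [hpart]
      simp only [Bool.false_eq_true, if_false, List.foldl_cons, List.foldl_nil, pvDecor, hdig]
      rw [insertBy_append_right pvCmp _ _ _ (by
            intro y hy
            simp only [List.mem_map] at hy
            obtain ⟨n, _, rfl⟩ := hy
            exact pvCmp_str_num _ n),
          insertBy_map pvCmp (fun a b => decide (a < b)) (fun s => ((1 : Int), (0 : Int), s)) _ _
            (fun a b => pvCmp_str_str a b),
          hsS]

-- ===== VERDICT (by name: the statement is the Claim_ definition above) =====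
theorem SortDocuments_spec : Claim_equal_SortDocuments := by
  intro ds _
  show SortDocuments ds = SortDocuments_alt ds
  have hA : SortDocuments ds
      = (PySem.List.sorted (pvPart ds).1 (fun x => x)).map PySem.Int.toStr
        ++ PySem.List.sorted (pvPart ds).2 (fun x => x) := rfl
  have hB : SortDocuments_alt ds
      = (PySem.List.sorted2 (ds.map pvDecor) (fun t => t.1) (fun t => toLex t.2)).map pvUndecor := rfl
  rw [hA, hB, sorted2_decor_eq, List.map_append, List.map_map, List.map_map]
  simp [Function.comp_def, pvUndecor]
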